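-- pv_equiv track=rewrite | github.com/gani0325/2023 | codingTest/Programmers/마리오게임.py | eat
-- ===== SOURCE A (Python) =====
-- def eat(n, mush):
--     answer = 0
--     k = 1
--     for i in range(n):
--         if i != n-1:
--             # 짝수라면
--             if k % 2 != 0:
--                 if mush[i] >= mush[i+1]:
--                     answer += mush[i]
--                     k += 1
--                 else:
--                     pass
--             # 홀수라면
--             else:
--                 if mush[i] >= mush[i+1]:
--                     answer -= mush[i]
--                     k += 1
--                 else:
--                     pass
--         else:
--             if k % 2 != 0:
--                 answer += mush[i]
--                 k += 1
--     return answer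
-- ===== SOURCE B (Python) =====
-- def eat(n, mush):
--     # pair-difference formulation: select, pair consecutive picks with the
--     # iterator-zip idiom, sum the differences, then settle the leftover/last.
--     prefix = mush[:max(n, 0)]
--     selected = [x for x, y in zip(prefix, prefix[1:]) if x >= y]
--     it = iter(selected)
--     total = sum(a - b for a, b in zip(it, it))
--     if len(selected) % 2:
--         total += selected[-1]
--     elif prefix:
--         total += prefix[-1]
--     return total
-- ===== Notes on version B (the rewrite author's own statement) =====
-- stated objective: alternative
-- what changed: Replaces A's single loop with a running parity counter and per-element sign flips by a pair-difference computation: select the qualifying mushrooms, pair consecutive picks with the iterator-zip idiom, sum the differences a-b of each pair, and settle the leftover pick (odd count) or the last mushroom (even count) afterwards; no sign variable or parity counter appears.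
-- outside the precondition, e.g. on eat(3, [5, 2]): A raises IndexError, B returns 5
import Mathlib
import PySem

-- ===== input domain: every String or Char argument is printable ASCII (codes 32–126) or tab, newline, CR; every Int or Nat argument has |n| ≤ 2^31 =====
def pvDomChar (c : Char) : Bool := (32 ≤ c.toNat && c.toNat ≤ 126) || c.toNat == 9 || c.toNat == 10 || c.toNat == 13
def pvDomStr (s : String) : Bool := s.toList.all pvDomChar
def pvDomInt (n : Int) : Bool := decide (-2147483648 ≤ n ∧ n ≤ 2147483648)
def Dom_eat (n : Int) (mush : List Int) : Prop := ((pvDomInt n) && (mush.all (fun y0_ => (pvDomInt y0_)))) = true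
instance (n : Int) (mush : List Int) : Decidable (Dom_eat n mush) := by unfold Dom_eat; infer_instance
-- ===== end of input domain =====

-- B replaces A's single loop with its running parity counter by a pair-difference
-- computation (select, pair consecutive picks, sum the differences); objective: alternative.

-- ===== PORT A =====
-- loop body of A ('for i in range(n): ...'), state (answer, k)
def eatStep (n : Int) (mush : List Int) (p : Int × Int) (i : Int) : Int × Int :=
  if i ≠ n - 1 then
    if PySem.Int.mod p.2 2 ≠ 0 then
      if PySem.List.pyGetD mush i 0 ≥ PySem.List.pyGetD mush (i + 1) 0 then
        (p.1 + PySem.List.pyGetD mush i 0, p.2 + 1)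
      else p
    else
      if PySem.List.pyGetD mush i 0 ≥ PySem.List.pyGetD mush (i + 1) 0 then
        (p.1 - PySem.List.pyGetD mush i 0, p.2 + 1)
      else p
  else
    if PySem.Int.mod p.2 2 ≠ 0 then (p.1 + PySem.List.pyGetD mush i 0, p.2 + 1)
    else p

def eat (n : Int) (mush : List Int) : Int :=
  ((PySem.List.pyRange 0 n 1).foldl (eatStep n mush) (0, 1)).1

-- ===== PORT B =====
-- exact port of zip(it, it) over it = iter(selected): consecutive non-overlapping
-- pairs, a leftover odd element is dropped
def pairUp {α : Type} : List α → List (α × α)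
  | x :: y :: r => (x, y) :: pairUp r
  | _ => []

def eat_alt (n : Int) (mush : List Int) : Int :=
  let prefix_ := PySem.List.slice mush none (some (max n 0))
  let selected := ((prefix_.zip (PySem.List.slice prefix_ (some 1) none)).filter
      (fun p => decide (p.1 ≥ p.2))).map Prod.fst
  let total := ((pairUp selected).map (fun p => p.1 - p.2)).sum
  -- selected[-1] / prefix[-1]: pyGetD with default 0 is exact here, the branch
  -- guards guarantee the list is nonempty
  if selected.length % 2 = 1 then total + PySem.List.pyGetD selected (-1) 0
  else if prefix_ ≠ [] then total + PySem.List.pyGetD prefix_ (-1) 0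
  else total

-- ===== PRECONDITION & SPEC =====
-- Pre_ excludes exactly the inputs where A raises IndexError (n exceeds len(mush)).
def Pre_eat (n : Int) (mush : List Int) : Prop := n ≤ (mush.length : Int)
instance (n : Int) (mush : List Int) : Decidable (Pre_eat n mush) := by unfold Pre_eat; infer_instance
def pvWitness_eat : Int × List Int := (4, [9, 3, 5, 6, 2])
def Spec_eat (n : Int) (mush : List Int) (out : Int) : Prop := out = eat_alt n mush
instance (n : Int) (mush : List Int) (out : Int) : Decidable (Spec_eat n mush out) := by unfold Spec_eat; infer_instance

-- ===== CLAIM (what is proved, stated in full; the proofs are below) =====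
def Claim_equal_eat : Prop := ∀ (n : Int) (mush : List Int), Dom_eat n mush → Pre_eat n mush → Spec_eat n mush (eat n mush)

-- ===== LEMMAS AND PROOFS =====

-- common recursive characterisation: walk the prefix, x gets sign from the parity
-- of k, the final element is added iff k ends up odd
def goA : List Int → Int → Int
  | [], _ => 0
  | [x], k => if k % 2 = 1 then x else 0
  | x :: y :: r, k =>
      if x ≥ y then (if k % 2 = 1 then x else -x) + goA (y :: r) (k + 1)
      else goA (y :: r) k

-- B's selection, on a bare list
def selZ (xs : List Int) : List Int :=
  ((xs.zip xs.tail).filter (fun p => decide (p.1 ≥ p.2))).map Prod.fst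

theorem selZ_single (x : Int) : selZ [x] = [] := rfl

theorem selZ_cons (x y : Int) (r : List Int) :
    selZ (x :: y :: r) = if x ≥ y then x :: selZ (y :: r) else selZ (y :: r) := by
  unfold selZ
  by_cases h : x ≥ y <;> simp [h, List.zip_cons_cons]

-- B's pair-difference total together with its leftover-element correction
def pairV (zs : List Int) : Int :=
  ((pairUp zs).map (fun p => p.1 - p.2)).sum
    + (if zs.length % 2 = 1 then PySem.List.pyGetD zs (-1) 0 else 0)

theorem pairV_nil : pairV [] = 0 := rfl

theorem pairV_two (a b : Int) (zs : List Int) : pairV (a :: b :: zs) = a - b + pairV zs := by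
  unfold pairV
  simp only [pairUp, List.map_cons, List.sum_cons, List.length_cons]
  by_cases h : zs.length % 2 = 1
  · cases zs with
    | nil => simp at h
    | cons c r =>
      rw [if_pos (show ((c :: r).length + 1 + 1) % 2 = 1 by omega),
        if_pos (show (c :: r).length % 2 = 1 from h),
        PySem.List.pyGetD_neg_one _ 0 (by simp),
        PySem.List.pyGetD_neg_one _ 0 (by simp)]
      simp [List.getLast_cons]
      ring
  · rw [if_neg (show ¬ ((zs.length + 1 + 1) % 2 = 1) by omega), if_neg h]; ring

theorem pairV_cons : ∀ (zs : List Int) (x : Int), pairV (x :: zs) = x - pairV zs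
  | [], x => by
      unfold pairV
      simp [pairUp, PySem.List.pyGetD_neg_one [x] 0 (by simp)]
  | [b], x => by
      rw [pairV_two, pairV_nil]
      unfold pairV
      simp [pairUp, PySem.List.pyGetD_neg_one [b] 0 (by simp)]
  | b :: c :: r, x => by
      rw [pairV_two, pairV_cons (c :: r) b]
      ring

-- A's recursive characterisation equals B's pair-difference value with sign and
-- last-element correction taken from the parity of k
theorem goA_eq_pairV : ∀ (xs : List Int), xs ≠ [] → ∀ (k : Int),
    goA xs k = (if k % 2 = 1 then pairV (selZ xs) else -pairV (selZ xs))
      + (if (k + ((selZ xs).length : Int)) % 2 = 1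
          then PySem.List.pyGetD xs (-1) 0 else 0)
  | [], h, _ => absurd rfl h
  | [x], _, k => by
      rw [selZ_single, PySem.List.pyGetD_neg_one [x] 0 (by simp)]
      simp only [goA, pairV_nil, List.length_nil, Nat.cast_zero, add_zero]
      by_cases h : k % 2 = 1 <;> simp [h]
  | x :: y :: r, _, k => by
      have hlast : PySem.List.pyGetD (x :: y :: r) (-1) 0
          = PySem.List.pyGetD (y :: r) (-1) 0 := by
        rw [PySem.List.pyGetD_neg_one _ 0 (by simp),
          PySem.List.pyGetD_neg_one (y :: r) 0 (by simp)]
        simp [List.getLast_cons]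
      have ih := goA_eq_pairV (y :: r) (by simp)
      rw [selZ_cons]
      by_cases hge : x ≥ y
      · simp only [goA, if_pos hge, ih (k + 1), hlast, pairV_cons, List.length_cons]
        push_cast
        split_ifs <;> omega
      · simp only [goA, if_neg hge, ih k, hlast]
-- parity of A's running counter: Python's k % 2 as Int emod
theorem pymod_two (k : Int) : PySem.Int.mod k 2 = k % 2 :=
  PySem.Int.mod_eq_emod_of_pos (by omega)

-- A's index loop from i computes goA on the corresponding suffix of the prefix
theorem eatA_fold (n : Int) (mush : List Int) (N : Nat) (hN : (N : Int) = n)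
    (hlen : N ≤ mush.length) :
    ∀ (m i : Nat) (a k : Int), N - i = m → i ≤ N →
      ((PySem.List.pyRange (i : Int) n 1).foldl (eatStep n mush) (a, k)).1
        = a + goA ((mush.take N).drop i) k := by
  intro m
  induction m with
  | zero =>
    intro i a k hm hi
    have hiN : i = N := by omega
    subst hiN
    rw [hN, PySem.List.pyRange_one_eq_nil (le_refl n),
      List.drop_eq_nil_of_le (by simp [hlen])]
    simp [goA]
  | succ m ih =>
    intro i a k hm hi
    have hiN : i < N := by omega
    have hilen : i < mush.length := by omega
    have hicast : ((i : Int)) < n := by omega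
    rw [PySem.List.pyRange_one_cons hicast, List.foldl_cons]
    have hgi : PySem.List.pyGetD mush (i : Int) 0 = mush[i] := by
      rw [PySem.List.pyGetD_natCast, List.getD_eq_getElem _ _ hilen]
    have hdrop : (mush.take N).drop i = mush[i] :: (mush.take N).drop (i + 1) := by
      rw [List.drop_eq_getElem_cons (by simp [hiN, hlen])]
      simp
    have hcast1 : ((i : Int)) + 1 = ((i + 1 : Nat) : Int) := by push_cast; ring
    by_cases hend : i + 1 < N
    · -- interior index: i != n-1
      have hne : (i : Int) ≠ n - 1 := by omega
      have hi1len : i + 1 < mush.length := by omega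
      have hgi1 : PySem.List.pyGetD mush ((i : Int) + 1) 0 = mush[i + 1] := by
        rw [hcast1, PySem.List.pyGetD_natCast, List.getD_eq_getElem _ _ hi1len]
      have hdrop1 : (mush.take N).drop (i + 1)
          = mush[i + 1] :: (mush.take N).drop (i + 2) := by
        rw [List.drop_eq_getElem_cons (by simp [hend, hlen])]
        simp
      rw [hdrop, hdrop1]
      simp only [eatStep, if_pos hne, hgi, hgi1, pymod_two]
      by_cases hge : mush[i] ≥ mush[i + 1]
      · rcases Int.emod_two_eq k with h2 | h2
        · rw [if_neg (by omega), if_pos hge, hcast1,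
            ih (i + 1) (a - mush[i]) (k + 1) (by omega) (by omega)]
          simp only [goA, if_pos hge, if_neg (show ¬ k % 2 = 1 by omega)]
          rw [← hdrop1]
          ring
        · rw [if_pos (by omega), if_pos hge, hcast1,
            ih (i + 1) (a + mush[i]) (k + 1) (by omega) (by omega)]
          simp only [goA, if_pos hge, if_pos h2]
          rw [← hdrop1]
          ring
      · rcases Int.emod_two_eq k with h2 | h2
        · rw [if_neg (by omega), if_neg hge, hcast1,
            ih (i + 1) a k (by omega) (by omega)]
          simp only [goA, if_neg hge]
          rw [← hdrop1]
        · rw [if_pos (by omega), if_neg hge, hcast1,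
            ih (i + 1) a k (by omega) (by omega)]
          simp only [goA, if_neg hge]
          rw [← hdrop1]
    · -- last index: i = n-1
      have hi1 : i + 1 = N := by omega
      have heq : (i : Int) = n - 1 := by omega
      have hnil : (mush.take N).drop (i + 1) = [] :=
        List.drop_eq_nil_of_le (by simp [hi1, hlen])
      have hrest : PySem.List.pyRange ((i : Int) + 1) n 1 = [] :=
        PySem.List.pyRange_one_eq_nil (by omega)
      rw [hdrop, hnil]
      simp only [eatStep, if_neg (show ¬ (i : Int) ≠ n - 1 by omega), hgi, pymod_two,
        hrest, List.foldl_nil]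
      rcases Int.emod_two_eq k with h2 | h2
      · rw [if_neg (by omega)]
        simp only [goA, if_neg (show ¬ k % 2 = 1 by omega)]
        ring
      · rw [if_pos (by omega)]
        simp only [goA, if_pos h2]

-- ===== VERDICT (by name: the statement is the Claim_ definition above) =====
theorem eat_spec : Claim_equal_eat := by
  intro n mush _hdom hpre
  unfold Pre_eat at hpre
  unfold Spec_eat eat eat_alt
  by_cases hn : 1 ≤ n
  · -- prefix is mush.take n.toNat, nonempty
    have hmax : max n 0 = n := by omega
    have hN : ((n.toNat : Nat) : Int) = n := Int.toNat_of_nonneg (by omega)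
    have hlen : n.toNat ≤ mush.length := by omega
    have hP : PySem.List.slice mush none (some (max n 0)) = mush.take n.toNat := by
      rw [hmax, PySem.List.slice_to mush (by omega)]
    have hPne : mush.take n.toNat ≠ [] := by
      have : (mush.take n.toNat).length = n.toNat := by simp [hlen]
      intro h; rw [h] at this; simp at this; omega
    have hA := eatA_fold n mush n.toNat hN hlen n.toNat 0 0 1 (by omega) (by omega)
    rw [show ((0 : Nat) : Int) = 0 by simp] at hA
    rw [hA, List.drop_zero, zero_add,
      goA_eq_pairV (mush.take n.toNat) hPne 1]
    simp only [hP, PySem.List.slice_from_one]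
    rw [show (((mush.take n.toNat).zip (mush.take n.toNat).tail).filter
        (fun p => decide (p.1 ≥ p.2))).map Prod.fst = selZ (mush.take n.toNat) from rfl]
    set zs := selZ (mush.take n.toNat) with hzs
    have h1 : (1 : Int) % 2 = 1 := by decide
    rw [if_pos h1]
    by_cases hodd : zs.length % 2 = 1
    · rw [if_neg (show ¬ (1 + ((zs.length : Nat) : Int)) % 2 = 1 by omega),
        if_pos hodd]
      unfold pairV
      rw [if_pos hodd]
      ring
    · rw [if_pos (show (1 + ((zs.length : Nat) : Int)) % 2 = 1 by omega),
        if_neg hodd, if_pos hPne]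
      unfold pairV
      rw [if_neg hodd]
      ring
  · -- n ≤ 0: empty range and empty prefix, both return 0
    have hmax : max n 0 = 0 := by omega
    rw [PySem.List.pyRange_one_eq_nil (by omega : n ≤ 0), hmax,
      PySem.List.slice_to mush (by omega)]
    simp [pairUp]
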